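-- pv_equiv track=rewrite | github.com/therydin-hub/TopptipsApp | app.py | get_doublets
-- ===== SOURCE A (Python) =====
-- def get_doublets(row_str):
--     d1, dx, d2, i = 0, 0, 0, 0
--     while i < len(row_str):
--         char, count = row_str[i], 1
--         while i + 1 < len(row_str) and row_str[i+1] == char: count += 1; i += 1
--         if count == 2:
--             if char == '1': d1 += 1
--             elif char == 'X': dx += 1
--             else: d2 += 1
--         i += 1
--     return d1, dx, d2, d1+dx+d2, max(d1, dx, d2)
-- ===== SOURCE B (Python) =====
-- def get_doublets(row_str):
--     sentinel = object()
--     chars = list(row_str)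
--     window = zip([sentinel] + chars, chars, chars[1:], chars[2:] + [sentinel])
--     d1 = dx = d2 = 0
--     for prev, a, b, nxt in window:
--         if a == b and prev != a and nxt != b:
--             if a == '1':
--                 d1 += 1
--             elif a == 'X':
--                 dx += 1
--             else:
--                 d2 += 1
--     return d1, dx, d2, d1 + dx + d2, max(d1, dx, d2)
-- ===== Notes on version B (the rewrite author's own statement) =====
-- stated objective: alternative
-- what changed: Replaces the index-based nested while-loop run detection with a single zip over four shifted copies of the string (sentinel-padded), counting positions whose local 4-char window marks the start of an exact-length-2 run.
import Mathlib
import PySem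

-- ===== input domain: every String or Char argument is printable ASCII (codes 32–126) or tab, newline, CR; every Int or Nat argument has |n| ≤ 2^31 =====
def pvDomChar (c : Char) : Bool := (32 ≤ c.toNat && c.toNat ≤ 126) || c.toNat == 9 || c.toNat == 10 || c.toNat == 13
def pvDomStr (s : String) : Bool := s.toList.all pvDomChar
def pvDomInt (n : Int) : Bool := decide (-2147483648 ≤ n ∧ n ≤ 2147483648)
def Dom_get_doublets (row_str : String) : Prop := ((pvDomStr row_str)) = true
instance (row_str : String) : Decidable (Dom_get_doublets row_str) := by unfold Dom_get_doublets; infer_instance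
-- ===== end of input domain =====

-- B replaces A's nested while-loop run detection by one zip over four shifted,
-- sentinel-padded copies of the string, counting the local windows that mark the
-- start of an exact-length-2 run; objective: alternative (same cost, different algorithm).

-- ===== PORT A =====
-- inner while loop: 'while i + 1 < len(row_str) and row_str[i+1] == char: count += 1; i += 1'
-- (the tail of the string from position i+1 is the list argument; it consumes the chars equal to char)
def aInner (char : Char) (l : List Char) (count : Int) : Int × List Char :=
  match l with
  | [] => (count, [])
  | x :: xs => if x = char then aInner char xs (count + 1) else (count, x :: xs)

-- the remaining tail never grows (needed for termination of the outer loop)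
theorem aInner_len (char : Char) (l : List Char) (count : Int) :
    (aInner char l count).2.length ≤ l.length := by
  induction l generalizing count with
  | nil => simp [aInner]
  | cons x xs ih =>
    simp only [aInner]
    split
    · exact le_trans (ih _) (by simp)
    · simp

-- outer while loop of A, on the tail of the string starting at index i
def aOuter (l : List Char) (d1 dx d2 : Int) : Int × Int × Int :=
  match h : l with
  | [] => (d1, dx, d2)
  | char :: rest =>
    let p := aInner char rest 1
    if p.1 = 2 then
      if char = '1' then aOuter p.2 (d1 + 1) dx d2
      else if char = 'X' then aOuter p.2 d1 (dx + 1) d2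
      else aOuter p.2 d1 dx (d2 + 1)
    else aOuter p.2 d1 dx d2
termination_by l.length
decreasing_by
  all_goals
    exact Nat.lt_succ_of_le (aInner_len char rest 1)

def get_doublets (row_str : String) : Int × Int × Int × Int × Int :=
  let t := aOuter row_str.toList 0 0 0
  (t.1, t.2.1, t.2.2, t.1 + t.2.1 + t.2.2, max t.1 (max t.2.1 t.2.2))

-- ===== PORT B =====
-- the body of B's for-loop over one window tuple (prev, a, b, nxt); the Python
-- sentinel (an object equal to nothing) is ported as 'none' in Option Char
def bStep (p : Option Char) (a b : Char) (q : Option Char) (acc : Int × Int × Int) : Int × Int × Int :=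
  if a = b ∧ p ≠ some a ∧ q ≠ some b then
    if a = '1' then (acc.1 + 1, acc.2.1, acc.2.2)
    else if a = 'X' then (acc.1, acc.2.1 + 1, acc.2.2)
    else (acc.1, acc.2.1, acc.2.2 + 1)
  else acc

def get_doublets_alt (row_str : String) : Int × Int × Int × Int × Int :=
  let s := row_str.toList
  -- zip([sentinel] + chars, chars, chars[1:], chars[2:] + [sentinel])
  let window := (none :: s.map some).zip (s.zip ((s.drop 1).zip ((s.drop 2).map some ++ [none])))
  let t := window.foldl (fun acc w => bStep w.1 w.2.1 w.2.2.1 w.2.2.2 acc) (0, 0, 0)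
  (t.1, t.2.1, t.2.2, t.1 + t.2.1 + t.2.2, max t.1 (max t.2.1 t.2.2))

-- ===== PRECONDITION & SPEC =====
def Spec_get_doublets (row_str : String) (out : Int × Int × Int × Int × Int) : Prop := out = get_doublets_alt row_str
instance (row_str : String) (out : Int × Int × Int × Int × Int) : Decidable (Spec_get_doublets row_str out) := by unfold Spec_get_doublets; infer_instance

-- ===== CLAIM (what is proved, stated in full; the proofs are below) =====
def Claim_equal_get_doublets : Prop := ∀ (row_str : String), Dom_get_doublets row_str → Spec_get_doublets row_str (get_doublets row_str)

-- ===== LEMMAS AND PROOFS =====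
-- proof-side recursion equivalent to B's fold over the zipped window: one step per
-- adjacent pair, threading the previous character
def gRun (p : Option Char) (l : List Char) (acc : Int × Int × Int) : Int × Int × Int :=
  match l with
  | a :: b :: t => gRun (some a) (b :: t) (bStep p a b t.head? acc)
  | _ => acc

-- B's fold over the window list is gRun
theorem window_foldl_eq_gRun (l : List Char) (p : Option Char) (acc : Int × Int × Int) :
    ((p :: l.map some).zip (l.zip ((l.drop 1).zip ((l.drop 2).map some ++ [none])))).foldl
        (fun acc w => bStep w.1 w.2.1 w.2.2.1 w.2.2.2 acc) acc = gRun p l acc := by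
  induction l generalizing p acc with
  | nil => simp [gRun]
  | cons a t ih =>
    match t with
    | [] => simp [gRun]
    | b :: t' =>
      have : (t'.map some ++ [none]).headI = t'.head? := by
        cases t' <;> simp
      simp only [List.map_cons, List.drop, gRun]
      cases t' with
      | nil => simp [gRun]
      | cons c t'' => simpa using ih (some a) (bStep p a b (some c) acc)

-- inside a run, once the previous character equals the run character, a window step counts nothing
theorem bStep_prev_eq (a b : Char) (q : Option Char) (acc : Int × Int × Int) :
    bStep (some a) a b q acc = acc := by
  simp [bStep]

theorem gRun_skip (c : Char) (k : Nat) (t : List Char) (acc : Int × Int × Int) :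
    gRun (some c) (c :: (List.replicate k c ++ t)) acc = gRun (some c) t acc := by
  induction k generalizing acc with
  | zero =>
    cases t with
    | nil => simp [gRun]
    | cons b t' => rw [List.replicate, List.nil_append, gRun, bStep_prev_eq]
  | succ k ih =>
    rw [List.replicate_succ, List.cons_append, gRun, bStep_prev_eq]
    exact ih acc

theorem head?_dropWhile_ne (p : Char → Bool) (l : List Char) :
    ∀ x, (l.dropWhile p).head? = some x → p x = false := by
  induction l with
  | nil => simp
  | cons a t ih =>
    intro x hx
    by_cases h : p a
    · exact ih x (by simpa [List.dropWhile, h] using hx)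
    · simp [List.dropWhile, h] at hx
      simpa [hx] using h

theorem takeWhile_eq_replicate (c : Char) (l : List Char) :
    l.takeWhile (· = c) = List.replicate (l.takeWhile (· = c)).length c := by
  induction l with
  | nil => simp
  | cons a t ih =>
    by_cases h : a = c
    · simp only [List.takeWhile_cons, h, decide_true, if_true, List.length_cons, List.replicate_succ]
      exact congrArg (List.cons c) ih
    · simp [h]

-- the inner while loop computes the takeWhile/dropWhile split of the run
theorem aInner_eq (char : Char) (l : List Char) (count : Int) :
    aInner char l count =
      (count + ((l.takeWhile (· = char)).length : Int), l.dropWhile (· = char)) := by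
  induction l generalizing count with
  | nil => simp [aInner]
  | cons x xs ih =>
    simp only [aInner, List.takeWhile, List.dropWhile]
    by_cases h : x = char
    · simp only [h, decide_true, if_true, ih, List.length_cons, Prod.mk.injEq]
      exact ⟨by push_cast; ring, trivial⟩
    · simp [h]

-- A's outer loop equals gRun, provided the previous character differs from the head
theorem aOuter_eq_gRun (l : List Char) (p : Option Char)
    (hp : ∀ c t, l = c :: t → p ≠ some c) (d1 dx d2 : Int) :
    aOuter l d1 dx d2 = gRun p l (d1, dx, d2) := by
  induction hn : l.length using Nat.strong_induction_on generalizing l p d1 dx d2 with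
  | _ n ih =>
    match l with
    | [] => simp [aOuter, gRun]
    | c :: rest =>
      have hpc : p ≠ some c := hp c rest rfl
      rw [aOuter, aInner_eq]
      have hrest : rest = List.replicate (rest.takeWhile (· = c)).length c ++ rest.dropWhile (· = c) := by
        conv_lhs => rw [← List.takeWhile_append_dropWhile (p := (· = c)) (l := rest)]
        rw [← takeWhile_eq_replicate c rest]
      have hdrh : ∀ x, (rest.dropWhile (· = c)).head? = some x → x ≠ c := by
        intro x hx
        have := head?_dropWhile_ne (· = c) rest x hx
        simpa using this
      have hlen : (rest.dropWhile (· = c)).length ≤ rest.length := List.length_dropWhile_le _ _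
      have hnn : rest.length + 1 = n := by simpa using hn
      generalize hkk : (rest.takeWhile (· = c)).length = k at hrest ⊢
      generalize hdd : rest.dropWhile (· = c) = dr at hrest hdrh hlen ⊢
      have hdrlt : dr.length < n := by omega
      have hdrhyp : ∀ c' t', dr = c' :: t' → (some c : Option Char) ≠ some c' := by
        intro c' t' hdt
        have hne := hdrh c' (by simp [hdt])
        intro hcon
        exact hne (Option.some.inj hcon).symm
      have hrec : ∀ d1 dx d2 : Int, aOuter dr d1 dx d2 = gRun (some c) dr (d1, dx, d2) :=
        fun d1 dx d2 => ih dr.length hdrlt dr (some c) hdrhyp d1 dx d2 rfl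
      simp only []
      by_cases hk1 : k = 1
      · -- a run of length exactly 2: both sides bump the same counter
        subst hk1
        have hl : c :: rest = c :: c :: dr := by rw [hrest]; simp
        rw [if_pos (by omega : (1 : Int) + (1 : Nat) = 2), hl, gRun]
        have hq : dr.head? ≠ some c := fun hq => hdrh c hq rfl
        have hstep : bStep p c c dr.head? (d1, dx, d2) =
            (if c = '1' then (d1 + 1, dx, d2)
             else if c = 'X' then (d1, dx + 1, d2)
             else (d1, dx, d2 + 1)) := by
          simp [bStep, hpc, hq]
        have hsk : ∀ acc, gRun (some c) (c :: dr) acc = gRun (some c) dr acc := by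
          intro acc
          simpa using gRun_skip c 0 dr acc
        split_ifs with h1 hX
        · rw [hrec, hsk, hstep, if_pos h1]
        · rw [hrec, hsk, hstep, if_neg h1, if_pos hX]
        · rw [hrec, hsk, hstep, if_neg h1, if_neg hX]
      · rw [if_neg (by omega : ¬ ((1 : Int) + (k : Nat) = 2)), hrec]
        cases k with
        | zero =>
          -- run of length 1
          have hl : c :: rest = c :: dr := by rw [hrest]; simp
          rw [hl]
          cases hd : dr with
          | nil => simp [gRun]
          | cons b t' =>
            have hbc : ¬ (c = b) := fun h => hdrh b (by simp [hd]) h.symm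
            rw [gRun]
            have : bStep p c b t'.head? (d1, dx, d2) = (d1, dx, d2) := by
              simp [bStep, hbc]
            rw [this]
        | succ k' =>
          -- run of length ≥ 3 (k' ≥ 1 since k ≠ 1)
          have hl : c :: rest = c :: c :: (List.replicate k' c ++ dr) := by
            rw [hrest, List.replicate_succ]
            simp
          rw [hl, gRun]
          have hhd : (List.replicate k' c ++ dr).head? = some c := by
            cases k' with
            | zero => omega
            | succ m => simp [List.replicate_succ]
          have hstep : bStep p c c (List.replicate k' c ++ dr).head? (d1, dx, d2) = (d1, dx, d2) := by
            simp [bStep, hhd]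
          rw [hstep, gRun_skip c k' dr]

-- ===== VERDICT (by name: the statement is the Claim_ definition above) =====
theorem get_doublets_spec : Claim_equal_get_doublets := by
  intro row_str _
  unfold Spec_get_doublets
  simp only [get_doublets, get_doublets_alt]
  rw [window_foldl_eq_gRun, aOuter_eq_gRun row_str.toList none (by intro c t _; simp)]
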